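-- pv_equiv track=rewrite | github.com/natthapon3090/hackerrank-assignment | two_characters.py | two_characters
-- ===== SOURCE A (Python) =====
-- def two_characters(s):
--
--     best=0
--
--     chars=set(s)
--
--     for a in chars:
--         for b in chars:
--
--             if a!=b:
--
--                 t=[c for c in s if c==a or c==b]
--
--                 valid=True
--
--                 for i in range(1,len(t)):
--
--                     if t[i]==t[i-1]:
--                         valid=False
--
--                 if valid:
--                     best=max(best,len(t))
--
--     return best
-- ===== SOURCE B (Python) =====
-- def merged_alternates(pa, pb):
--     # pa, pb: disjoint strictly increasing index lists; True iff merging them by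
--     # value never takes two consecutive elements from the same list.
--     la, lb = len(pa), len(pb)
--     i = j = 0
--     last_a = None
--     while i < la or j < lb:
--         if j >= lb or (i < la and pa[i] < pb[j]):
--             if last_a is True:
--                 return False
--             last_a = True
--             i += 1
--         else:
--             if last_a is False:
--                 return False
--             last_a = False
--             j += 1
--     return True
--
--
-- def two_characters(s):
--     chars = list(dict.fromkeys(s))
--     items = [(c, [i for i, x in enumerate(s) if x == c]) for c in chars]
--     best = 0
--     for idx in range(len(items)):
--         pa = items[idx][1]
--         for (b, pb) in items[idx + 1:]:
--             if merged_alternates(pa, pb):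
--                 best = max(best, len(pa) + len(pb))
--     return best
-- ===== Notes on version B (the rewrite author's own statement) =====
-- stated objective: faster
-- what changed: B never filters or rescans s per pair: it precomputes one sorted index list per character in a single pass over s, then for each unordered pair of characters merges the two index lists, checking that the merge alternates sources; A rebuilds and rescans a filtered copy of s for every ordered pair.
import Mathlib
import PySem

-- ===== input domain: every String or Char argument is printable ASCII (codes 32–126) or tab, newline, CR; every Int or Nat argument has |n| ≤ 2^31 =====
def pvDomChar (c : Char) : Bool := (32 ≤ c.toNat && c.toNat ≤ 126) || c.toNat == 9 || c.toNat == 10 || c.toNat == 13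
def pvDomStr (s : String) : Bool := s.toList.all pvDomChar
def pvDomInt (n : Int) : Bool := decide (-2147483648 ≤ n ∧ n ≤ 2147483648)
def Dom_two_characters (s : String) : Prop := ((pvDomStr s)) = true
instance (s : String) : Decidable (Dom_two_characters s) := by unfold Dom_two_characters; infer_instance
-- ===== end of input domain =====

-- B precomputes one sorted index list per character and, per unordered pair, merges the two
-- index lists checking that the merge alternates sources — no per-pair filtering or rescanning
-- of s as in A; objective: faster.

-- ===== PORT A =====
def two_characters (s : String) : Int :=
  let chars := PySem.Set.ofList s.toList
  chars.foldl (fun best a =>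
    chars.foldl (fun best b =>
      if a != b then
        let t := s.toList.filter (fun c => c == a || c == b)
        let valid := (PySem.List.pyRange 1 (t.length : Int) 1).foldl
          (fun valid i =>
            if PySem.List.pyGet? t i == PySem.List.pyGet? t (i - 1) then false else valid) true
        if valid then max best (t.length : Int) else best
      else best) best) 0

-- ===== PORT B =====
-- the while loop of merged_alternates; i, j are the two cursors, last the source of the
-- previously merged element (some true = first list).  pa.getD i 0 / pb.getD j 0 port the
-- in-range accesses pa[i] / pb[j] (the guards ensure the index is in range exactly as in Python,
-- so getD is exact there).
def mergedGo (pa pb : List Int) (i j : Nat) (last : Option Bool) : Bool :=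
  if h : i < pa.length ∨ j < pb.length then
    if h2 : pb.length ≤ j ∨ (i < pa.length ∧ pa.getD i 0 < pb.getD j 0) then
      if last == some true then false
      else mergedGo pa pb (i + 1) j (some true)
    else
      if last == some false then false
      else mergedGo pa pb i (j + 1) (some false)
  else true
termination_by (pa.length - i) + (pb.length - j)
decreasing_by
  · rcases h2 with h2 | h2
    · rcases h with h | h
      · omega
      · omega
    · omega
  · omega

def mergedAlternates (pa pb : List Int) : Bool := mergedGo pa pb 0 0 none

-- [i for i, x in enumerate(s) if x == c]
def posOfChar (s : List Char) (c : Char) : List Int :=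
  ((PySem.List.enumerate s 0).filter (fun p => p.2 == c)).map Prod.fst

-- the nested 'for idx / for (b, pb) in items[idx+1:]' loops
def twoCharsPairs : List (Char × List Int) → Int → Int
  | [], best => best
  | (_, pa) :: rest, best =>
      twoCharsPairs rest (rest.foldl (fun best bp =>
        if mergedAlternates pa bp.2 then max best ((pa.length : Int) + (bp.2.length : Int))
        else best) best)

def two_characters_alt (s : String) : Int :=
  let chars := PySem.List.dedup s.toList
  let items := chars.map (fun c => (c, posOfChar s.toList c))
  twoCharsPairs items 0

-- ===== PRECONDITION & SPEC =====
def Spec_two_characters (s : String) (out : Int) : Prop := out = two_characters_alt s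
instance (s : String) (out : Int) : Decidable (Spec_two_characters s out) := by unfold Spec_two_characters; infer_instance

-- ===== CLAIM (what is proved, stated in full; the proofs are below) =====
def Claim_equal_two_characters : Prop := ∀ (s : String), Dom_two_characters s → Spec_two_characters s (two_characters s)

-- ===== LEMMAS AND PROOFS =====

def tcFilter (s : List Char) (a b : Char) : List Char := s.filter (fun c => c == a || c == b)

def adjOK : List Char → Bool
  | [] => true
  | [_] => true
  | x :: y :: r => (!(y == x)) && adjOK (y :: r)

def chainOK : Option Char → List Char → Bool
  | _, [] => true
  | last, c :: r => (!(some c == last)) && chainOK (some c) r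

def headNe (x : Char) : List Char → Bool
  | [] => true
  | y :: _ => !(y == x)

def pairVal (s : List Char) (a b : Char) : Int := ((tcFilter s a b).length : Int)
def pairOK (s : List Char) (a b : Char) : Bool := adjOK (tcFilter s a b)

def pairsOf {α : Type} : List α → List (α × α)
  | [] => []
  | a :: r => r.map (Prod.mk a) ++ pairsOf r

-- structural form of B's merge loop: recursion on the two suffixes
def mA : List Int → List Int → Option Bool → Bool
  | [], [], _ => true
  | _ :: xs, [], last => (last != some true) && mA xs [] (some true)
  | [], _ :: ys, last => (last != some false) && mA [] ys (some false)
  | x :: xs, y :: ys, last =>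
      if x < y then (last != some true) && mA xs (y :: ys) (some true)
      else (last != some false) && mA (x :: xs) ys (some false)
termination_by a b _ => a.length + b.length

-- index lists starting at offset k (proof-side mirror of posOfChar)
def posFrom (k : Int) : List Char → Char → List Int
  | [], _ => []
  | c' :: s, c => if c' == c then k :: posFrom (k + 1) s c else posFrom (k + 1) s c

theorem posFrom_bound (s : List Char) (c : Char) (k : Int) (x : Int)
    (hx : x ∈ posFrom k s c) : k ≤ x := by
  induction s generalizing k with
  | nil => cases hx
  | cons c' r ih =>
      by_cases h : (c' == c) = true
      · rw [posFrom, if_pos h] at hx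
        rcases List.mem_cons.mp hx with h1 | h1
        · omega
        · have := ih (k + 1) h1; omega
      · rw [posFrom, if_neg h] at hx
        have := ih (k + 1) hx; omega

theorem posOfChar_eq_posFrom (s : List Char) (c : Char) (k : Int) :
    ((PySem.List.enumerate s k).filter (fun p => p.2 == c)).map Prod.fst = posFrom k s c := by
  induction s generalizing k with
  | nil => simp [PySem.List.enumerate_nil, posFrom]
  | cons c' r ih =>
      rw [PySem.List.enumerate_cons, posFrom]
      by_cases h : (c' == c) = true
      · simp [h, ih]
      · simp [h, ih]

theorem mA_nil_nil (last : Option Bool) : mA [] [] last = true := by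
  rw [mA.eq_def]

theorem mA_cons_nil (x : Int) (xs : List Int) (last : Option Bool) :
    mA (x :: xs) [] last = ((last != some true) && mA xs [] (some true)) := by
  rw [mA.eq_def]

theorem mA_nil_cons (y : Int) (ys : List Int) (last : Option Bool) :
    mA [] (y :: ys) last = ((last != some false) && mA [] ys (some false)) := by
  rw [mA.eq_def]

theorem mA_cons_cons (x : Int) (xs : List Int) (y : Int) (ys : List Int) (last : Option Bool) :
    mA (x :: xs) (y :: ys) last
      = if x < y then ((last != some true) && mA xs (y :: ys) (some true))
        else ((last != some false) && mA (x :: xs) ys (some false)) := by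
  rw [mA.eq_def]

theorem mergedGo_eq_mA (pa pb : List Int) (i j : Nat) (last : Option Bool) :
    mergedGo pa pb i j last = mA (pa.drop i) (pb.drop j) last := by
  fun_induction mergedGo pa pb i j last with
  | case1 i j last h h2 hl =>
      have hi : i < pa.length := by
        rcases h2 with h2 | h2
        · rcases h with h | h
          · exact h
          · omega
        · exact h2.1
      have hl' : last = some true := by simpa using hl
      rw [List.drop_eq_getElem_cons hi]
      rcases hd : pb.drop j with _ | ⟨y, ys⟩
      · rw [mA_cons_nil]; simp [hl']
      · have hj : j < pb.length := by
          by_contra hc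
          rw [List.drop_eq_nil_of_le (by omega)] at hd; cases hd
        have hy : pb[j] = y := by
          rw [List.drop_eq_getElem_cons hj] at hd
          injection hd with h1 h2
        have hxy : pa[i] < y := by
          rcases h2 with h2 | h2
          · omega
          · rw [← hy]
            have := h2.2
            rwa [List.getD_eq_getElem _ _ hi, List.getD_eq_getElem _ _ hj] at this
        rw [mA_cons_cons, if_pos hxy]; simp [hl']
  | case2 i j last h h2 hl ih =>
      have hi : i < pa.length := by
        rcases h2 with h2 | h2
        · rcases h with h | h
          · exact h
          · omega
        · exact h2.1
      have hl' : last ≠ some true := by simpa using hl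
      rw [ih, List.drop_eq_getElem_cons hi]
      rcases hd : pb.drop j with _ | ⟨y, ys⟩
      · rw [mA_cons_nil]; simp [hl']
      · have hj : j < pb.length := by
          by_contra hc
          rw [List.drop_eq_nil_of_le (by omega)] at hd; cases hd
        have hy : pb[j] = y := by
          rw [List.drop_eq_getElem_cons hj] at hd
          injection hd with h1 h2
        have hxy : pa[i] < y := by
          rcases h2 with h2 | h2
          · omega
          · rw [← hy]
            have := h2.2
            rwa [List.getD_eq_getElem _ _ hi, List.getD_eq_getElem _ _ hj] at this
        rw [mA_cons_cons, if_pos hxy]; simp [hl']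
  | case3 i j last h h2 hl =>
      have hj : j < pb.length := by
        by_contra hc
        exact h2 (Or.inl (by omega))
      have hl' : last = some false := by simpa using hl
      rw [List.drop_eq_getElem_cons hj]
      rcases hd : pa.drop i with _ | ⟨x, xs⟩
      · rw [mA_nil_cons]; simp [hl']
      · have hi : i < pa.length := by
          by_contra hc
          rw [List.drop_eq_nil_of_le (by omega)] at hd; cases hd
        have hx : pa[i] = x := by
          rw [List.drop_eq_getElem_cons hi] at hd
          injection hd with h1 h2
        have hxy : ¬ (x < pb[j]) := by
          rw [← hx]
          intro hc
          exact h2 (Or.inr ⟨hi, by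
            rw [List.getD_eq_getElem _ _ hi, List.getD_eq_getElem _ _ hj]; exact hc⟩)
        rw [mA_cons_cons, if_neg hxy]; simp [hl']
  | case4 i j last h h2 hl ih =>
      have hj : j < pb.length := by
        by_contra hc
        exact h2 (Or.inl (by omega))
      have hl' : last ≠ some false := by simpa using hl
      rw [ih, List.drop_eq_getElem_cons hj]
      rcases hd : pa.drop i with _ | ⟨x, xs⟩
      · rw [mA_nil_cons]; simp [hl']
      · have hi : i < pa.length := by
          by_contra hc
          rw [List.drop_eq_nil_of_le (by omega)] at hd; cases hd
        have hx : pa[i] = x := by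
          rw [List.drop_eq_getElem_cons hi] at hd
          injection hd with h1 h2
        have hxy : ¬ (x < pb[j]) := by
          rw [← hx]
          intro hc
          exact h2 (Or.inr ⟨hi, by
            rw [List.getD_eq_getElem _ _ hi, List.getD_eq_getElem _ _ hj]; exact hc⟩)
        rw [mA_cons_cons, if_neg hxy]; simp [hl']
  | case5 i j last h =>
      rw [List.drop_eq_nil_of_le (by omega), List.drop_eq_nil_of_le (by omega), mA_nil_nil]

-- the heart: merging the two index lists and checking source alternation is the
-- adjacent-equality check on the filtered list
theorem mA_posFrom (s : List Char) (a b : Char) (hab : a ≠ b) (k : Int) (last : Option Bool) :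
    mA (posFrom k s a) (posFrom k s b) last
      = chainOK (last.map (fun f => if f then a else b)) (tcFilter s a b) := by
  induction s generalizing k last with
  | nil =>
      cases last with
      | none => simp [posFrom, tcFilter, mA_nil_nil, chainOK]
      | some f => simp [posFrom, tcFilter, mA_nil_nil, chainOK]
  | cons c r ih =>
      by_cases ha : (c == a) = true
      · have hb : (c == b) = false := by
          have : c = a := by simpa using ha
          subst this
          simpa using hab
        rw [posFrom, posFrom, if_pos ha, if_neg (by simp [hb])]
        have hstep : mA (k :: posFrom (k + 1) r a) (posFrom (k + 1) r b) last
            = ((last != some true) && mA (posFrom (k + 1) r a) (posFrom (k + 1) r b) (some true)) := by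
          rcases hq : posFrom (k + 1) r b with _ | ⟨y, ys⟩
          · exact mA_cons_nil _ _ _
          · have hy : k < y := by
              have : y ∈ posFrom (k + 1) r b := by rw [hq]; exact List.mem_cons_self
              have := posFrom_bound r b (k + 1) y this
              omega
            rw [mA_cons_cons, if_pos hy]
        rw [hstep, ih]
        have hf : tcFilter (c :: r) a b = c :: tcFilter r a b := by
          simp [tcFilter, ha]
        rw [hf, chainOK]
        have hc : c = a := by simpa using ha
        subst hc
        congr 1
        cases last with
        | none => simp
        | some f =>
            cases f
            · simp [hb]
            · simp
      · by_cases hb : (c == b) = true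
        · rw [posFrom, posFrom, if_neg (by simp [ha]), if_pos hb]
          have hstep : mA (posFrom (k + 1) r a) (k :: posFrom (k + 1) r b) last
              = ((last != some false) && mA (posFrom (k + 1) r a) (posFrom (k + 1) r b) (some false)) := by
            rcases hq : posFrom (k + 1) r a with _ | ⟨x, xs⟩
            · exact mA_nil_cons _ _ _
            · have hx : ¬ (x < k) := by
                have : x ∈ posFrom (k + 1) r a := by rw [hq]; exact List.mem_cons_self
                have := posFrom_bound r a (k + 1) x this
                omega
              rw [mA_cons_cons, if_neg hx]
          rw [hstep, ih]
          have hf : tcFilter (c :: r) a b = c :: tcFilter r a b := by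
            simp [tcFilter, hb]
          rw [hf, chainOK]
          have hc : c = b := by simpa using hb
          subst hc
          congr 1
          cases last with
          | none => simp
          | some f =>
              cases f
              · simp
              · have hca : (c == a) = false := by simpa using ha
                simp [hca]
        · rw [posFrom, posFrom, if_neg (by simp [ha]), if_neg (by simp [hb])]
          rw [ih]
          have hf : tcFilter (c :: r) a b = tcFilter r a b := by
            simp [tcFilter, ha, hb]
          rw [hf]

theorem posFrom_length (s : List Char) (a b : Char) (hab : a ≠ b) (k : Int) :
    (posFrom k s a).length + (posFrom k s b).length = (tcFilter s a b).length := by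
  induction s generalizing k with
  | nil => rfl
  | cons c r ih =>
      by_cases ha : (c == a) = true
      · have hb : (c == b) = false := by
          have : c = a := by simpa using ha
          subst this; simpa using hab
        rw [posFrom, posFrom, if_pos ha, if_neg (by simp [hb])]
        have hf : tcFilter (c :: r) a b = c :: tcFilter r a b := by
          simp [tcFilter, ha]
        rw [hf]
        simp only [List.length_cons]
        rw [← ih (k + 1)]
        omega
      · by_cases hb : (c == b) = true
        · rw [posFrom, posFrom, if_neg (by simp [ha]), if_pos hb]
          have hf : tcFilter (c :: r) a b = c :: tcFilter r a b := by
            simp [tcFilter, hb]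
          rw [hf]
          simp only [List.length_cons]
          rw [← ih (k + 1)]
          omega
        · rw [posFrom, posFrom, if_neg (by simp [ha]), if_neg (by simp [hb])]
          have hf : tcFilter (c :: r) a b = tcFilter r a b := by
            simp [tcFilter, ha, hb]
          rw [hf, ih (k + 1)]

theorem chainOK_none_eq_adjOK (t : List Char) : chainOK none t = adjOK t := by
  have hsome : ∀ (t : List Char) (x : Char), chainOK (some x) t = (headNe x t && adjOK t) := by
    intro t
    induction t with
    | nil => intro x; simp [chainOK, headNe, adjOK]
    | cons y r ih =>
        intro x
        have hadj : adjOK (y :: r) = (headNe y r && adjOK r) := by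
          cases r <;> simp [adjOK, headNe]
        simp [chainOK, headNe, ih, hadj]
  cases t with
  | nil => rfl
  | cons x r =>
      have hadj : adjOK (x :: r) = (headNe x r && adjOK r) := by
        cases r <;> simp [adjOK, headNe]
      simp [chainOK, hsome, hadj]

theorem mergedAlternates_eq_pairOK (s : List Char) (a b : Char) (hab : a ≠ b) :
    mergedAlternates (posOfChar s a) (posOfChar s b) = pairOK s a b := by
  unfold mergedAlternates posOfChar
  rw [mergedGo_eq_mA]
  simp only [List.drop_zero]
  rw [posOfChar_eq_posFrom, posOfChar_eq_posFrom, mA_posFrom s a b hab 0 none]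
  simp [pairOK, chainOK_none_eq_adjOK]

theorem posOfChar_length (s : List Char) (a b : Char) (hab : a ≠ b) :
    ((posOfChar s a).length : Int) + ((posOfChar s b).length : Int) = pairVal s a b := by
  unfold posOfChar
  rw [posOfChar_eq_posFrom, posOfChar_eq_posFrom]
  unfold pairVal
  rw [← posFrom_length s a b hab 0]
  push_cast
  ring

-- symmetry of the pair data
theorem tcFilter_comm (s : List Char) (a b : Char) : tcFilter s a b = tcFilter s b a := by
  unfold tcFilter
  congr 1
  funext c
  exact Bool.or_comm _ _

theorem pairOK_comm (s : List Char) (a b : Char) : pairOK s a b = pairOK s b a := by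
  unfold pairOK; rw [tcFilter_comm]

theorem pairVal_comm (s : List Char) (a b : Char) : pairVal s a b = pairVal s b a := by
  unfold pairVal; rw [tcFilter_comm]

-- fold shape lemmas: g best p = if c p then max best (v p) else best
theorem foldl_keepmax_ge {α : Type} (c : α → Bool) (v : α → Int) (l : List α) (init : Int) :
    init ≤ l.foldl (fun best p => if c p then max best (v p) else best) init := by
  induction l generalizing init with
  | nil => simp
  | cons x xs ih =>
      simp only [List.foldl_cons]
      refine le_trans ?_ (ih _)
      by_cases h : c x = true <;> simp [h]

theorem foldl_keepmax_le {α : Type} (c : α → Bool) (v : α → Int) (l : List α) (init M : Int)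
    (h0 : init ≤ M) (h : ∀ p ∈ l, c p = true → v p ≤ M) :
    l.foldl (fun best p => if c p then max best (v p) else best) init ≤ M := by
  induction l generalizing init with
  | nil => simpa using h0
  | cons x xs ih =>
      simp only [List.foldl_cons]
      apply ih
      · by_cases hc : c x = true
        · simp only [hc, if_pos]
          exact max_le h0 (h x (by simp) hc)
        · simpa [hc] using h0
      · intro p hp hcp; exact h p (by simp [hp]) hcp

theorem foldl_keepmax_mem {α : Type} (c : α → Bool) (v : α → Int) (l : List α) (init : Int)
    (p : α) (hp : p ∈ l) (hc : c p = true) :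
    v p ≤ l.foldl (fun best p => if c p then max best (v p) else best) init := by
  induction l generalizing init with
  | nil => cases hp
  | cons x xs ih =>
      simp only [List.foldl_cons]
      rcases List.mem_cons.mp hp with h | h
      · subst h
        refine le_trans ?_ (foldl_keepmax_ge c v xs _)
        simp [hc]
      · exact ih _ h

-- flattening A's nested fold
theorem foldl_foldl_product {α β γ : Type} (g : α → β → γ → γ) (l1 : List α) (l2 : List β) (init : γ) :
    l1.foldl (fun acc a => l2.foldl (fun acc b => g a b acc) acc) init
    = (l1.flatMap (fun a => l2.map (Prod.mk a))).foldl (fun acc p => g p.1 p.2 acc) init := by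
  induction l1 generalizing init with
  | nil => simp
  | cons x xs ih =>
      simp only [List.foldl_cons, List.flatMap_cons, List.foldl_append, List.foldl_map]
      exact ih _

-- B's nested loops = fold over pairsOf of the items list
theorem twoCharsPairs_eq (items : List (Char × List Int)) (init : Int) :
    twoCharsPairs items init
    = (pairsOf items).foldl (fun best q =>
        if mergedAlternates q.1.2 q.2.2 then max best ((q.1.2.length : Int) + (q.2.2.length : Int))
        else best) init := by
  induction items generalizing init with
  | nil => simp [twoCharsPairs, pairsOf]
  | cons ap rest ih =>
      rcases ap with ⟨a, pa⟩
      simp only [twoCharsPairs, pairsOf, List.foldl_append, List.foldl_map]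
      rw [ih]

theorem pairsOf_map {α β : Type} (f : α → β) (l : List α) :
    pairsOf (l.map f) = (pairsOf l).map (fun p => (f p.1, f p.2)) := by
  induction l with
  | nil => rfl
  | cons x r ih =>
      simp only [List.map_cons, pairsOf, ih, List.map_append, List.map_map]
      rfl

-- pair membership
theorem pairsOf_mem_of {α : Type} {cs : List α} {a b : α} (ha : a ∈ cs) (hb : b ∈ cs)
    (hab : a ≠ b) : (a, b) ∈ pairsOf cs ∨ (b, a) ∈ pairsOf cs := by
  induction cs with
  | nil => cases ha
  | cons x r ih =>
      rcases List.mem_cons.mp ha with h1 | h1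
      · subst h1
        have hb' : b ∈ r := by
          rcases List.mem_cons.mp hb with h2 | h2
          · exact absurd h2.symm hab
          · exact h2
        left
        simp only [pairsOf, List.mem_append, List.mem_map]
        exact Or.inl ⟨b, hb', rfl⟩
      · rcases List.mem_cons.mp hb with h2 | h2
        · subst h2
          right
          simp only [pairsOf, List.mem_append, List.mem_map]
          exact Or.inl ⟨a, h1, rfl⟩
        · rcases ih h1 h2 with h | h
          · left; simp [pairsOf, h]
          · right; simp [pairsOf, h]

theorem mem_of_pairsOf {α : Type} {cs : List α} (hnd : cs.Nodup) {a b : α}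
    (h : (a, b) ∈ pairsOf cs) : a ∈ cs ∧ b ∈ cs ∧ a ≠ b := by
  induction cs with
  | nil => cases h
  | cons x r ih =>
      rcases List.nodup_cons.mp hnd with ⟨hx, hr⟩
      simp only [pairsOf, List.mem_append, List.mem_map] at h
      rcases h with ⟨y, hy, heq⟩ | h
      · injection heq with h1 h2
        subst h1; subst h2
        exact ⟨by simp, by simp [hy], fun hEq => hx (hEq ▸ hy)⟩
      · obtain ⟨ha, hb, hab⟩ := ih hr h
        exact ⟨by simp [ha], by simp [hb], hab⟩

-- A's inner validity fold is the adjacent-equality check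
theorem foldl_latch (l : List Int) (p : Int → Bool) (b : Bool) :
    l.foldl (fun v i => if p i then false else v) b = (b && l.all (fun i => !p i)) := by
  induction l generalizing b with
  | nil => simp
  | cons x xs ih =>
      simp only [List.foldl_cons, List.all_cons]
      by_cases h : p x = true
      · rw [if_pos h, ih]; simp [h]
      · rw [if_neg h, ih]; simp [h]

theorem range_all_eq_adjOK (t : List Char) :
    (List.range (t.length - 1)).all (fun k => !(t[k+1]? == t[k]?)) = adjOK t := by
  induction t with
  | nil => simp [adjOK]
  | cons x r ih =>
      cases r with
      | nil => simp [adjOK]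
      | cons y r' =>
          rw [show (x :: y :: r').length - 1 = r'.length + 1 from by simp]
          rw [List.range_succ_eq_map]
          simp only [List.all_cons, List.all_map, Function.comp_def, Nat.succ_eq_add_one,
            List.getElem?_cons_succ, List.getElem?_cons_zero]
          rw [show adjOK (x :: y :: r') = (!(y == x) && adjOK (y :: r')) from rfl]
          rw [← ih]
          simp

theorem pyrange_valid_eq_adjOK (t : List Char) :
    (PySem.List.pyRange 1 (t.length : Int) 1).foldl
      (fun valid i =>
        if PySem.List.pyGet? t i == PySem.List.pyGet? t (i - 1) then false else valid) true
    = adjOK t := by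
  rw [foldl_latch, Bool.true_and, PySem.List.pyRange_one, List.all_map]
  rw [← range_all_eq_adjOK]
  rw [show ((t.length : Int) - 1).toNat = t.length - 1 from by omega]
  congr 1
  funext k
  have h1 : (1 : Int) + (k : Int) = ((k + 1 : Nat) : Int) := by push_cast; ring
  have h3 : ((k + 1 : Nat) : Int) - 1 = ((k : Nat) : Int) := by push_cast; ring
  simp only [Function.comp_def, h1, h3, PySem.List.pyGet?_natCast]

theorem gmaxA_eq (s : List Char) (best : Int) (a b : Char) :
    (if a != b then
        let t := s.filter (fun c => c == a || c == b)
        let valid := (PySem.List.pyRange 1 (t.length : Int) 1).foldl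
          (fun valid i =>
            if PySem.List.pyGet? t i == PySem.List.pyGet? t (i - 1) then false else valid) true
        if valid then max best (t.length : Int) else best
      else best)
    = (if ((a != b) && pairOK s a b) then max best (pairVal s a b) else best) := by
  dsimp only
  rw [pyrange_valid_eq_adjOK]
  by_cases h : (a != b) = true
  · rw [if_pos h]
    cases hok : adjOK (s.filter (fun c => c == a || c == b))
    · rw [if_neg (by simp)]
      rw [if_neg (by simp [h, pairOK, tcFilter, hok])]
    · rw [if_pos rfl]
      rw [if_pos (by simp [h, pairOK, tcFilter, hok])]
      rfl
  · rw [if_neg h, if_neg (by simp [h])]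

-- ===== VERDICT (by name: the statement is the Claim_ definition above) =====
theorem two_characters_spec : Claim_equal_two_characters := by
  unfold Claim_equal_two_characters Spec_two_characters
  intro s _
  have hA : two_characters s
      = ((PySem.Set.ofList s.toList).flatMap
          (fun a => (PySem.Set.ofList s.toList).map (Prod.mk a))).foldl
          (fun best p => if ((p.1 != p.2) && pairOK s.toList p.1 p.2)
            then max best (pairVal s.toList p.1 p.2) else best) 0 := by
    unfold two_characters
    rw [← foldl_foldl_product (fun a b best => if ((a != b) && pairOK s.toList a b)
          then max best (pairVal s.toList a b) else best)]
    dsimp only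
    simp only [gmaxA_eq]
  have hchars : PySem.List.dedup s.toList = PySem.Set.ofList s.toList :=
    PySem.List.dedup_eq_ofList s.toList
  have hnd : (PySem.Set.ofList s.toList).Nodup := PySem.Set.nodup_ofList s.toList
  have hB : two_characters_alt s
      = (pairsOf (PySem.Set.ofList s.toList)).foldl
          (fun best p => if pairOK s.toList p.1 p.2
            then max best (pairVal s.toList p.1 p.2) else best) 0 := by
    unfold two_characters_alt
    rw [hchars, twoCharsPairs_eq, pairsOf_map]
    rw [List.foldl_map]
    apply PySem.List.foldl_congr_mem
    intro acc p hp
    obtain ⟨_, _, hab⟩ := mem_of_pairsOf hnd hp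
    rw [mergedAlternates_eq_pairOK s.toList p.1 p.2 hab,
        posOfChar_length s.toList p.1 p.2 hab]
  rw [hA, hB]
  apply le_antisymm
  · apply foldl_keepmax_le
    · exact foldl_keepmax_ge _ _ _ 0
    · rintro ⟨a, b⟩ hp hc
      simp only [List.mem_flatMap, List.mem_map] at hp
      obtain ⟨a', ha', b', hb', heq⟩ := hp
      injection heq with e1 e2
      subst e1; subst e2
      simp only [Bool.and_eq_true, bne_iff_ne, ne_eq] at hc
      obtain ⟨hab, hok⟩ := hc
      rcases pairsOf_mem_of ha' hb' hab with h | h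
      · exact foldl_keepmax_mem _ _ _ 0 (a', b') h hok
      · have := foldl_keepmax_mem (fun p => pairOK s.toList p.1 p.2)
          (fun p => pairVal s.toList p.1 p.2) (pairsOf (PySem.Set.ofList s.toList)) 0 (b', a') h
          (by simpa [pairOK_comm s.toList b' a'] using hok)
        simpa [pairVal_comm s.toList b' a'] using this
  · apply foldl_keepmax_le
    · exact foldl_keepmax_ge _ _ _ 0
    · rintro ⟨a, b⟩ hp hc
      obtain ⟨ha, hb, hab⟩ := mem_of_pairsOf hnd hp
      refine foldl_keepmax_mem _ _ _ 0 (a, b) ?_ ?_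
      · simp only [List.mem_flatMap, List.mem_map]
        exact ⟨a, ha, b, hb, rfl⟩
      · simp only [Bool.and_eq_true, bne_iff_ne, ne_eq]
        exact ⟨hab, hc⟩
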